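-- pv_equiv track=rewrite | github.com/gabrielfcastro/TR1-UnB-2025-1 | Camada fisica/modulacoes/bipolar.py | modular
-- ===== SOURCE A (Python) =====
-- def modular(bits: list[int]) -> list[int]:
--     """
--     Modula uma sequencia de bits usando codificacao bipolar.
--
--     Args:
--         bits (list[int]): lista de bits (0s e 1s) a serem modulados.
--
--     Returns:
--         list[int]: lista de niveis de tensao para transmissao:
--             0 -> 0V
--             1 -> alterna +1 e -1 a cada 1 sucessivo
--
--     Examples:
--         Entrada: [1, 0, 1, 1, 0, 1]
--         Saida:   [+1, 0, -1, +1, 0, -1]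
--     """
--     sinais = []
--     ultimo = -1  # Comeca em -1 para que o primeiro 1 gere +1
--     for bit in bits:
--         if bit == 0:
--             sinais.append(0)
--         else:
--             ultimo *= -1  # alterna entre +1 e -1
--             sinais.append(ultimo)
--     return sinais
-- ===== SOURCE B (Python) =====
-- def modular(bits: list[int]) -> list[int]:
--     # Two-pass: prefix count of non-zero bits, then sign by parity of that count.
--     counts = []
--     c = 0
--     for b in bits:
--         if b != 0:
--             c += 1
--         counts.append(c)
--     return [0 if b == 0 else (1 if c % 2 == 1 else -1) for b, c in zip(bits, counts)]
-- ===== Notes on version B (the rewrite author's own statement) =====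
-- stated objective: alternative
-- what changed: Replaces the single loop threading a toggling polarity variable by two passes: a prefix count of non-zero bits, then a zip-comprehension choosing 0 / +1 / -1 from each position's count parity.
import Mathlib
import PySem

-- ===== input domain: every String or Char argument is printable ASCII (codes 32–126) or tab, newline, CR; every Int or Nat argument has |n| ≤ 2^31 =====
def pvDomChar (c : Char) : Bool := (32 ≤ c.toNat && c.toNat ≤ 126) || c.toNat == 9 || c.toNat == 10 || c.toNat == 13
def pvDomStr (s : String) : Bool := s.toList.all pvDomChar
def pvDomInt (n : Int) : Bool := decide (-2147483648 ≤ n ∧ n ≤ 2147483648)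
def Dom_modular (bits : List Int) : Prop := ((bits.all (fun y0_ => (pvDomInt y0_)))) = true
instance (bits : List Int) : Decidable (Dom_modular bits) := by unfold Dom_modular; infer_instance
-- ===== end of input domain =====

-- B replaces A's single loop with a toggling polarity variable by two passes: a prefix count
-- of non-zero bits, then a zip/map choosing 0 / +1 / -1 by that count's parity (alternative, same cost).


-- ===== PORT A =====
-- loop: state (sinais, ultimo), appending per bit exactly as the Python loop does
def modular (bits : List Int) : List Int :=
  (bits.foldl (fun (st : List Int × Int) bit =>
      if bit = 0 then (st.1 ++ [0], st.2)
      else (st.1 ++ [st.2 * -1], st.2 * -1)) ([], -1)).1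

-- ===== PORT B =====
-- first pass: prefix counts of non-zero bits (state (counts, c), as in Source B)
def modularCounts (bits : List Int) : List Int :=
  (bits.foldl (fun (st : List Int × Int) b =>
      let c := if b ≠ 0 then st.2 + 1 else st.2
      (st.1 ++ [c], c)) ([], 0)).1

def modular_alt (bits : List Int) : List Int :=
  (bits.zip (modularCounts bits)).map
    (fun p => if p.1 = 0 then 0 else if PySem.Int.mod p.2 2 = 1 then 1 else -1)

-- ===== PRECONDITION & SPEC =====
def Spec_modular (bits : List Int) (out : List Int) : Prop := out = modular_alt bits
instance (bits : List Int) (out : List Int) : Decidable (Spec_modular bits out) := by unfold Spec_modular; infer_instance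

-- ===== CLAIM (what is proved, stated in full; the proofs are below) =====
def Claim_equal_modular : Prop := ∀ (bits : List Int), Dom_modular bits → Spec_modular bits (modular bits)

-- ===== LEMMAS AND PROOFS =====

-- recursive characterisations of the two folds
def goA (u : Int) : List Int → List Int
  | [] => []
  | b :: bs => if b = 0 then 0 :: goA u bs else (u * -1) :: goA (u * -1) bs

def goC (c : Int) : List Int → List Int
  | [] => []
  | b :: bs => let c' := if b ≠ 0 then c + 1 else c; c' :: goC c' bs

theorem foldlA_eq (bits : List Int) (acc : List Int) (u : Int) :
    (bits.foldl (fun (st : List Int × Int) bit =>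
      if bit = 0 then (st.1 ++ [0], st.2)
      else (st.1 ++ [st.2 * -1], st.2 * -1)) (acc, u)).1 = acc ++ goA u bits := by
  induction bits generalizing acc u with
  | nil => simp [goA]
  | cons b bs ih =>
    simp only [List.foldl_cons]
    by_cases hb : b = 0
    · rw [if_pos hb, ih]; simp [goA, hb]
    · rw [if_neg hb, ih]; simp [goA, hb]

theorem foldlC_eq (bits : List Int) (acc : List Int) (c : Int) :
    (bits.foldl (fun (st : List Int × Int) b =>
      let c := if b ≠ 0 then st.2 + 1 else st.2
      (st.1 ++ [c], c)) (acc, c)).1 = acc ++ goC c bits := by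
  induction bits generalizing acc c with
  | nil => simp [goC]
  | cons b bs ih =>
    simp only [List.foldl_cons]
    by_cases hb : b = 0 <;> simp only [hb, ne_eq, not_true_eq_false, not_false_eq_true,
      ite_true, ite_false, ih, goC, List.append_assoc, List.singleton_append]

theorem parity_flip (c : Int) :
    (if c % 2 = 1 then (1 : Int) else -1) * -1 = (if (c + 1) % 2 = 1 then (1 : Int) else -1) := by
  rcases Int.emod_two_eq_zero_or_one c with h2 | h2 <;> simp [h2] <;> omega

theorem goA_eq_goC (bits : List Int) (c : Int) :
    goA (if c % 2 = 1 then 1 else -1) bits =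
      (bits.zip (goC c bits)).map
        (fun p => if p.1 = 0 then 0 else if PySem.Int.mod p.2 2 = 1 then 1 else -1) := by
  induction bits generalizing c with
  | nil => simp [goA, goC]
  | cons b bs ih =>
    by_cases hb : b = 0
    · simp [goA, goC, hb, ih c]
    · have hc' : (if b ≠ 0 then c + 1 else c) = c + 1 := if_pos hb
      simp only [goA, goC, hc', if_neg hb, List.zip_cons_cons, List.map_cons]
      rw [parity_flip c, ih (c + 1)]
      simp

-- ===== VERDICT (by name: the statement is the Claim_ definition above) =====
theorem modular_spec : Claim_equal_modular := by
  intro bits _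
  unfold Spec_modular modular modular_alt modularCounts
  rw [foldlA_eq bits [] (-1), foldlC_eq bits [] 0]
  have h := goA_eq_goC bits 0
  simpa using h
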